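-- pv_equiv track=rewrite | github.com/tranquilite/challenges | adventofcode/2023/days/09.py | helper_build_history
-- ===== SOURCE A (Python) =====
-- def helper_build_history(line: str) -> list:
--     history = [[int(e) for e in line.strip().split()]]
--
--     while not all(map(lambda x: x == 0, history[-1])):
--         history.append([
--             history[-1][e] - history[-1][e-1] for
--             e in range(1, len(history[-1]))
--         ])
--
--     return history
-- ===== SOURCE B (Python) =====
-- def helper_build_history(line: str) -> list:
--     def build(row):
--         if all(v == 0 for v in row):
--             return [row]
--         return [row] + build([b - a for a, b in zip(row, row[1:])])
--
--     return build([int(e) for e in line.strip().split()])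
-- ===== Notes on version B (the rewrite author's own statement) =====
-- stated objective: simpler
-- what changed: Replaces the imperative while-loop that keeps appending to a history list and re-indexes history[-1] with positional arithmetic by a structural recursion on the current row, computing each difference row by zipping the row with its own tail.
import Mathlib
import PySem

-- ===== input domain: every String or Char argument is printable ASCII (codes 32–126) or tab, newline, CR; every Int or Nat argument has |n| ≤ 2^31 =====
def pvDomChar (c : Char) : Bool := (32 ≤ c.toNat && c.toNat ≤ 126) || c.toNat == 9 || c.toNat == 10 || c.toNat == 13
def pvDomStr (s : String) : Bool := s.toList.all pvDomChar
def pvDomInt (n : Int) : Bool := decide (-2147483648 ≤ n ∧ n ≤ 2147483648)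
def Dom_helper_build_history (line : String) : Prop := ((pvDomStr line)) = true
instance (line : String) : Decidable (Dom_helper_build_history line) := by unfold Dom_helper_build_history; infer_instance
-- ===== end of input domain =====

-- B replaces A's while-loop over history[-1] by a structural recursion on the row,
-- forming each difference row by zipping the row with its tail (simpler decomposition).

-- ===== PORT A =====
-- A's while loop: state = (history so far, history[-1]); each turn appends the
-- difference row [history[-1][e] - history[-1][e-1] for e in range(1, len(history[-1]))].
-- Indices e and e-1 are always in range, so the .getD 0 default is never used (exact).
def hbhDiffA (last : List Int) : List Int :=
  (PySem.List.pyRange 1 (last.length : Int) 1).map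
    (fun e => (PySem.List.pyGet? last e).getD 0 - (PySem.List.pyGet? last (e - 1)).getD 0)

def hbhLoopA (hist : List (List Int)) (last : List Int) : List (List Int) :=
  if last.all (fun x => x == 0) then hist
  else hbhLoopA (hist ++ [hbhDiffA last]) (hbhDiffA last)
termination_by last.length
decreasing_by
  simp only [hbhDiffA, List.length_map, PySem.List.length_pyRange_one]
  cases last with
  | nil => simp_all
  | cons a t => simp

-- int(e) raises ValueError on unparsable tokens: those inputs are excluded by Pre_,
-- so the .getD 0 default is never used (exact).
def helper_build_history (line : String) : List (List Int) :=
  let first := (PySem.Str.split₀ (PySem.Str.strip line)).map (fun e => (PySem.Int.ofStr? e).getD 0)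
  hbhLoopA [first] first

-- ===== PORT B =====
def hbhBuild (row : List Int) : List (List Int) :=
  if row.all (fun v => v == 0) then [row]
  else row :: hbhBuild ((row.zip (row.drop 1)).map (fun p => p.2 - p.1))
termination_by row.length
decreasing_by
  cases row with
  | nil => simp_all
  | cons a t => simp

def helper_build_history_alt (line : String) : List (List Int) :=
  hbhBuild ((PySem.Str.split₀ (PySem.Str.strip line)).map (fun e => (PySem.Int.ofStr? e).getD 0))

-- ===== PRECONDITION & SPEC =====
-- Pre_ excludes exactly the lines with a token int() cannot parse, where A raises ValueError.
def Pre_helper_build_history (line : String) : Prop :=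
  ∀ t ∈ PySem.Str.split₀ (PySem.Str.strip line), (PySem.Int.ofStr? t).isSome = true
instance (line : String) : Decidable (Pre_helper_build_history line) := by
  unfold Pre_helper_build_history; infer_instance

def pvWitness_helper_build_history : String := "10 13 16 21 30 45"

def Spec_helper_build_history (line : String) (out : List (List Int)) : Prop := out = helper_build_history_alt line
instance (line : String) (out : List (List Int)) : Decidable (Spec_helper_build_history line out) := by unfold Spec_helper_build_history; infer_instance

-- ===== CLAIM (what is proved, stated in full; the proofs are below) =====
def Claim_equal_helper_build_history : Prop := ∀ (line : String), Dom_helper_build_history line → Pre_helper_build_history line → Spec_helper_build_history line (helper_build_history line)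

-- ===== LEMMAS AND PROOFS =====

-- A's index-arithmetic difference row equals B's zip-with-tail difference row.
lemma hbh_diff_eq (row : List Int) :
    hbhDiffA row = (row.zip (row.drop 1)).map (fun p => p.2 - p.1) := by
  unfold hbhDiffA
  apply List.ext_getElem
  · simp [PySem.List.length_pyRange_one, List.length_zip]
  · intro i h1 h2
    simp only [List.getElem_map, PySem.List.getElem_pyRange_one, List.getElem_zip,
      List.getElem_drop]
    have hi : 1 + i < row.length := by
      simp [PySem.List.length_pyRange_one] at h1; omega
    have e1 : PySem.List.pyGet? row (1 + (i : Int)) = some row[1 + i] := by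
      have h : (1 + (i : Int)) = ((1 + i : Nat) : Int) := by omega
      rw [h, PySem.List.pyGet?_natCast]
      simp [hi]
    have e2 : PySem.List.pyGet? row (1 + (i : Int) - 1) = some row[i] := by
      have h : (1 + (i : Int) - 1) = ((i : Nat) : Int) := by omega
      rw [h, PySem.List.pyGet?_natCast]
      simp [show i < row.length by omega]
    rw [e1, e2]
    simp

-- A's loop, started with history = pre ++ [row] (so history[-1] = row), prepends pre
-- to what B's recursion produces from row.
lemma hbh_loop_eq (n : Nat) : ∀ (row : List Int), row.length = n →
    ∀ (pre : List (List Int)), hbhLoopA (pre ++ [row]) row = pre ++ hbhBuild row := by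
  induction n using Nat.strong_induction_on with
  | _ n ih =>
    intro row hlen pre
    rw [hbhLoopA.eq_def, hbhBuild.eq_def]
    by_cases hz : row.all (fun x => x == 0)
    · simp [hz]
    · simp only [hz, Bool.false_eq_true, if_false]
      rw [hbh_diff_eq]
      have hne : row ≠ [] := by intro h; subst h; simp at hz
      have hlt : ((row.zip (row.drop 1)).map (fun p => p.2 - p.1)).length < n := by
        cases row with
        | nil => exact absurd rfl hne
        | cons a t => simp at hlen ⊢; omega
      have := ih _ hlt _ rfl (pre ++ [row])
      rw [List.append_assoc] at this
      rw [List.append_assoc, this, List.append_assoc]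
      simp

-- ===== VERDICT (by name: the statement is the Claim_ definition above) =====
theorem helper_build_history_spec : Claim_equal_helper_build_history := by
  intro line _ _
  unfold Spec_helper_build_history helper_build_history helper_build_history_alt
  simpa using hbh_loop_eq _ _ rfl []
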